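-- pv_equiv track=rewrite | github.com/alsuddlek1/codetree-TILs | 240523/나누고 빼면서 합하기/divide-and-subtract-and-add-up.py | array
-- ===== SOURCE A (Python) =====
-- def array(N, M, arr):
--     result = 0
--     while M > 0:
--         if M % 2 != 0:
--             result += arr[M-1]
--             M -= 1
--         else:
--             result += arr[M-1]
--             M = M // 2
--     return result
-- ===== SOURCE B (Python) =====
-- def array(N, M, arr):
--     if M <= 0:
--         return 0
--     if M % 2 != 0:
--         return arr[M-1] + array(N, M-1, arr)
--     return arr[M-1] + array(N, M // 2, arr)
-- ===== Notes on version B (the rewrite author's own statement) =====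
-- stated objective: simpler
-- what changed: Replaced the while-loop with an explicit result accumulator by a direct two-case recursion on M that returns arr[M-1] plus the recursive sum.
import Mathlib
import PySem

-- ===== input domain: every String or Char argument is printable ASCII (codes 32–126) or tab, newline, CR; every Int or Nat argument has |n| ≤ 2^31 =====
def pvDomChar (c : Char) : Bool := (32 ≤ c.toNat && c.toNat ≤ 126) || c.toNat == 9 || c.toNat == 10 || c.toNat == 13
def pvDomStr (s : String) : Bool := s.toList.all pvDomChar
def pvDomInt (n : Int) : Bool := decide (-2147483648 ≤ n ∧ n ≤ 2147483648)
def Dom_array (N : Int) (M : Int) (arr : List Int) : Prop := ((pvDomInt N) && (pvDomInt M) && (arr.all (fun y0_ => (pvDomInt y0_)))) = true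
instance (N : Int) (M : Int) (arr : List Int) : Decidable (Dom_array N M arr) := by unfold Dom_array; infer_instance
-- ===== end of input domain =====

-- B re-expresses A's while-loop-with-accumulator as a direct two-case recursion on M (simpler decomposition, same cost); equivalence is on the return value.

-- ===== PORT A =====
-- while M > 0: result += arr[M-1]; M -= 1 if M odd else M //= 2
-- (pyGet? none = IndexError: loop result there is irrelevant, excluded by Pre_)
def arrayLoop (arr : List Int) (M result : Int) : Int :=
  if 0 < M then
    match PySem.List.pyGet? arr (M - 1) with
    | none => result
    | some v =>
      if PySem.Int.mod M 2 ≠ 0 then arrayLoop arr (M - 1) (result + v)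
      else arrayLoop arr (PySem.Int.floordiv M 2) (result + v)
  else result
termination_by M.toNat
decreasing_by
  · omega
  · rw [PySem.Int.floordiv_eq_ediv_of_pos (by omega)]; omega

def array (N : Int) (M : Int) (arr : List Int) : Int :=
  arrayLoop arr M 0

-- ===== PORT B =====
-- direct recursion: arr[M-1] + recursive sum on M-1 (M odd) or M//2 (M even)
def array_alt (N : Int) (M : Int) (arr : List Int) : Int :=
  if 0 < M then
    match PySem.List.pyGet? arr (M - 1) with
    | none => 0
    | some v =>
      if PySem.Int.mod M 2 ≠ 0 then v + array_alt N (M - 1) arr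
      else v + array_alt N (PySem.Int.floordiv M 2) arr
  else 0
termination_by M.toNat
decreasing_by
  · omega
  · rw [PySem.Int.floordiv_eq_ediv_of_pos (by omega)]; omega

-- ===== PRECONDITION & SPEC =====
-- A raises IndexError when M > len(arr) (first access arr[M-1]); B raises there too.
def Pre_array (N : Int) (M : Int) (arr : List Int) : Prop := M ≤ (arr.length : Int)
instance (N : Int) (M : Int) (arr : List Int) : Decidable (Pre_array N M arr) := by unfold Pre_array; infer_instance
def pvWitness_array : Int × Int × List Int := (3, 3, [1, 2, 3])

def Spec_array (N : Int) (M : Int) (arr : List Int) (out : Int) : Prop := out = array_alt N M arr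
instance (N : Int) (M : Int) (arr : List Int) (out : Int) : Decidable (Spec_array N M arr out) := by unfold Spec_array; infer_instance

-- ===== CLAIM (what is proved, stated in full; the proofs are below) =====
def Claim_equal_array : Prop := ∀ (N : Int) (M : Int) (arr : List Int), Dom_array N M arr → Pre_array N M arr → Spec_array N M arr (array N M arr)

-- ===== LEMMAS AND PROOFS =====

-- loop invariant: the accumulator splits off additively
theorem arrayLoop_eq (N : Int) (arr : List Int) (M result : Int) :
    arrayLoop arr M result = result + array_alt N M arr := by
  fun_induction arrayLoop arr M result with
  | case1 M result h hm =>
    rw [array_alt, if_pos h, hm]; ring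
  | case2 M result h v hv hodd ih =>
    rw [array_alt, if_pos h, hv]; dsimp only; rw [if_pos hodd, ih]; ring
  | case3 M result h v hv hodd ih =>
    rw [array_alt, if_pos h, hv]; dsimp only; rw [if_neg hodd, ih]; ring
  | case4 M result h =>
    rw [array_alt, if_neg h]; ring

-- ===== VERDICT (by name: the statement is the Claim_ definition above) =====
theorem array_spec : Claim_equal_array := by
  intro N M arr _ _
  unfold Spec_array array
  rw [arrayLoop_eq N]; ring
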